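-- pv_equiv track=rewrite | github.com/clivepato93/Edabit_challenges | Very Easy/sum_common.py | sum_common
-- ===== SOURCE A (Python) =====
-- def sum_common(lst1, lst2, lst3):
--     new_lst= []
--     lst1.sort()
--     lst2.sort()
--     lst3.sort()
--     for number in lst3:
--         if number not in lst1 and number not in lst2:
--             continue
--         else:
--             new_lst.append(number)
--     return sum(new_lst)
-- ===== SOURCE B (Python) =====
-- def sum_common(lst1, lst2, lst3):
--     lst1.sort()
--     lst2.sort()
--     lst3.sort()
--     i = j = 0
--     total = 0
--     for x in lst3:
--         # advance each pointer to the first element >= x (lst3 is sorted, so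
--         # the pointers only ever move forward across the whole loop)
--         while i < len(lst1) and lst1[i] < x:
--             i += 1
--         while j < len(lst2) and lst2[j] < x:
--             j += 1
--         if (i < len(lst1) and lst1[i] == x) or (j < len(lst2) and lst2[j] == x):
--             total += x
--     return total
-- ===== Notes on version B (the rewrite author's own statement) =====
-- stated objective: faster
-- what changed: Replaces the per-element linear 'in' scans over lst1 and lst2 with a two-pointer merge over the already-sorted lists, keeping the same in-place sorts and a running integer total instead of an intermediate list.
import Mathlib
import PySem

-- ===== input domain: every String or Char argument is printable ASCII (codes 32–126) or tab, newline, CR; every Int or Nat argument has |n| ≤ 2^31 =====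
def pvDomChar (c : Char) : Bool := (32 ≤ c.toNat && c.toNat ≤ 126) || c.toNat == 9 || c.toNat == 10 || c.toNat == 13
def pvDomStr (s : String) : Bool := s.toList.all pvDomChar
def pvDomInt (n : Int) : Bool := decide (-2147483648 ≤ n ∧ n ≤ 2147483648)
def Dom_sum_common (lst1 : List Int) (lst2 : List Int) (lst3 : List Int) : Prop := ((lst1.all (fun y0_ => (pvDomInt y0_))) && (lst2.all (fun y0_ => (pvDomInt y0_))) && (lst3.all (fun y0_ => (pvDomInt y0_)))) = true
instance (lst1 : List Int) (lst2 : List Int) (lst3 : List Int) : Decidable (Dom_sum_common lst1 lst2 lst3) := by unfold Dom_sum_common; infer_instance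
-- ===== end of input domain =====

-- B replaces A's per-element linear membership scans with a two-pointer merge over the
-- sorted lists (objective: faster). Both A and B sort all three argument lists in place;
-- the equivalence proved here is about the RETURN value (the mutation is identical anyway).

-- ===== PORT A =====
def sum_common (lst1 : List Int) (lst2 : List Int) (lst3 : List Int) : Int :=
  let l1 := PySem.List.sorted lst1 (fun x => x) false
  let l2 := PySem.List.sorted lst2 (fun x => x) false
  let l3 := PySem.List.sorted lst3 (fun x => x) false
  let new_lst := l3.foldl
    (fun acc number => if ¬ (number ∈ l1) ∧ ¬ (number ∈ l2) then acc else acc ++ [number])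
    ([] : List Int)
  new_lst.foldl (· + ·) 0

-- ===== PORT B =====
-- Python B's integer pointers i/j are represented by the corresponding suffixes of the
-- sorted lists: the inner 'while lst[i] < x: i += 1' loop is skipLt (drop while < x).
def skipLt (x : Int) : List Int → List Int
  | [] => []
  | y :: ys => if y < x then skipLt x ys else y :: ys

def sumLoop (l1 l2 : List Int) (xs : List Int) (total : Int) : Int :=
  match xs with
  | [] => total
  | x :: rest =>
    let l1' := skipLt x l1
    let l2' := skipLt x l2
    let total' := if l1'.head? = some x ∨ l2'.head? = some x then total + x else total
    sumLoop l1' l2' rest total'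

def sum_common_alt (lst1 : List Int) (lst2 : List Int) (lst3 : List Int) : Int :=
  sumLoop (PySem.List.sorted lst1 (fun x => x) false)
          (PySem.List.sorted lst2 (fun x => x) false)
          (PySem.List.sorted lst3 (fun x => x) false) 0

-- ===== PRECONDITION & SPEC =====
def Spec_sum_common (lst1 : List Int) (lst2 : List Int) (lst3 : List Int) (out : Int) : Prop := out = sum_common_alt lst1 lst2 lst3
instance (lst1 : List Int) (lst2 : List Int) (lst3 : List Int) (out : Int) : Decidable (Spec_sum_common lst1 lst2 lst3 out) := by unfold Spec_sum_common; infer_instance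

-- ===== CLAIM (what is proved, stated in full; the proofs are below) =====
def Claim_equal_sum_common : Prop := ∀ (lst1 : List Int) (lst2 : List Int) (lst3 : List Int), Dom_sum_common lst1 lst2 lst3 → Spec_sum_common lst1 lst2 lst3 (sum_common lst1 lst2 lst3)

-- ===== LEMMAS AND PROOFS =====

theorem mem_skipLt (x y : Int) (l : List Int) (hxy : x ≤ y) : y ∈ skipLt x l ↔ y ∈ l := by
  induction l with
  | nil => simp [skipLt]
  | cons z zs ih =>
    by_cases hz : z < x
    · simp only [skipLt, if_pos hz, ih, List.mem_cons]
      constructor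
      · exact Or.inr
      · rintro (rfl | h)
        · omega
        · exact h
    · simp [skipLt, if_neg hz]

theorem pairwise_skipLt (x : Int) (l : List Int) (h : l.Pairwise (· ≤ ·)) :
    (skipLt x l).Pairwise (· ≤ ·) := by
  induction l with
  | nil => simp [skipLt]
  | cons z zs ih =>
    by_cases hz : z < x
    · simpa [skipLt, if_pos hz] using ih h.of_cons
    · simpa [skipLt, if_neg hz] using h

theorem head?_skipLt (x : Int) (l : List Int) (h : l.Pairwise (· ≤ ·)) :
    (skipLt x l).head? = some x ↔ x ∈ l := by
  induction l with
  | nil => simp [skipLt]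
  | cons z zs ih =>
    by_cases hz : z < x
    · rw [skipLt, if_pos hz, ih h.of_cons]
      simp only [List.mem_cons]
      constructor
      · exact Or.inr
      · rintro (rfl | hm)
        · omega
        · exact hm
    · rw [skipLt, if_neg hz]
      simp only [List.head?_cons, Option.some.injEq, List.mem_cons]
      constructor
      · intro he; exact Or.inl he.symm
      · rintro (rfl | hm)
        · rfl
        · have hzx : z ≤ x := (List.pairwise_cons.mp h).1 x hm
          omega

theorem foldl_add_eq_sum (l : List Int) (a : Int) : l.foldl (· + ·) a = a + l.sum := by
  induction l generalizing a with
  | nil => simp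
  | cons x xs ih => simp [List.foldl_cons, ih, List.sum_cons]; ring

theorem sumLoop_eq (xs : List Int) : ∀ (l1 l2 : List Int) (tot : Int),
    xs.Pairwise (· ≤ ·) → l1.Pairwise (· ≤ ·) → l2.Pairwise (· ≤ ·) →
    sumLoop l1 l2 xs tot
      = tot + (xs.filter (fun y => decide (y ∈ l1) || decide (y ∈ l2))).sum := by
  induction xs with
  | nil => intro l1 l2 tot _ _ _; simp [sumLoop]
  | cons x rest ih =>
    intro l1 l2 tot h3 h1 h2
    have hx : ∀ y ∈ rest, x ≤ y := fun y hy => (List.pairwise_cons.mp h3).1 y hy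
    have h3' : rest.Pairwise (· ≤ ·) := (List.pairwise_cons.mp h3).2
    rw [sumLoop]
    rw [ih (skipLt x l1) (skipLt x l2) _ h3' (pairwise_skipLt x l1 h1) (pairwise_skipLt x l2 h2)]
    have hfc : rest.filter (fun y => decide (y ∈ skipLt x l1) || decide (y ∈ skipLt x l2))
        = rest.filter (fun y => decide (y ∈ l1) || decide (y ∈ l2)) := by
      apply List.filter_congr
      intro y hy
      rw [show (decide (y ∈ skipLt x l1)) = decide (y ∈ l1) from by
            simp only [decide_eq_decide]; exact mem_skipLt x y l1 (hx y hy),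
          show (decide (y ∈ skipLt x l2)) = decide (y ∈ l2) from by
            simp only [decide_eq_decide]; exact mem_skipLt x y l2 (hx y hy)]
    rw [hfc]
    have hcond : ((skipLt x l1).head? = some x ∨ (skipLt x l2).head? = some x)
        ↔ (x ∈ l1 ∨ x ∈ l2) := by
      rw [head?_skipLt x l1 h1, head?_skipLt x l2 h2]
    by_cases hc : x ∈ l1 ∨ x ∈ l2
    · rw [if_pos (hcond.mpr hc)]
      have : (List.filter (fun y => decide (y ∈ l1) || decide (y ∈ l2)) (x :: rest))
          = x :: rest.filter (fun y => decide (y ∈ l1) || decide (y ∈ l2)) := by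
        simp only [List.filter_cons]
        rw [if_pos]
        rcases hc with hc | hc <;> simp [hc]
      rw [this, List.sum_cons]; ring
    · rw [if_neg (fun h => hc (hcond.mp h))]
      have : (List.filter (fun y => decide (y ∈ l1) || decide (y ∈ l2)) (x :: rest))
          = rest.filter (fun y => decide (y ∈ l1) || decide (y ∈ l2)) := by
        simp only [List.filter_cons]
        rw [if_neg]
        simp only [not_or] at hc
        simp [hc.1, hc.2]
      rw [this]

-- ===== VERDICT (by name: the statement is the Claim_ definition above) =====
theorem sum_common_spec : Claim_equal_sum_common := by
  intro lst1 lst2 lst3 _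
  unfold Spec_sum_common sum_common sum_common_alt
  set l1 := PySem.List.sorted lst1 (fun x => x) false with hl1
  set l2 := PySem.List.sorted lst2 (fun x => x) false with hl2
  set l3 := PySem.List.sorted lst3 (fun x => x) false with hl3
  have hp1 : l1.Pairwise (· ≤ ·) := PySem.List.sorted_pairwise lst1 (fun x => x)
  have hp2 : l2.Pairwise (· ≤ ·) := PySem.List.sorted_pairwise lst2 (fun x => x)
  have hp3 : l3.Pairwise (· ≤ ·) := PySem.List.sorted_pairwise lst3 (fun x => x)
  rw [sumLoop_eq l3 l1 l2 0 hp3 hp1 hp2]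
  have hA : l3.foldl
      (fun acc number => if ¬ (number ∈ l1) ∧ ¬ (number ∈ l2) then acc else acc ++ [number])
      ([] : List Int)
      = l3.filter (fun y => decide (y ∈ l1) || decide (y ∈ l2)) := by
    have := PySem.List.foldl_congr_mem
      (l := l3) (init := ([] : List Int))
      (f := fun acc number => if ¬ (number ∈ l1) ∧ ¬ (number ∈ l2) then acc else acc ++ [number])
      (g := fun acc number => if (number ∈ l1 ∨ number ∈ l2) then acc ++ [number] else acc)
      (by intro acc y _; by_cases h1 : y ∈ l1 <;> by_cases h2 : y ∈ l2 <;> simp [h1, h2])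
    rw [this, PySem.List.foldl_append_ite_eq_filter]
    simp
  dsimp only
  rw [hA, foldl_add_eq_sum]
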